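-- pv_equiv track=rewrite | github.com/Hyojeong721/TIL | make_sub_reop_file/SWA/0817/ready2start/1215_회문1/s1.py | count_palindrome
-- ===== SOURCE A (Python) =====
-- def is_palindrome(word):
--     """주어진 문자열이 회문인지 검사한다.
--     Returns:
--         주어진 문자열이 회문이면 True, 회문이 아니면 False
--     """
--     for i in range(len(word) // 2):
--         if word[i] != word[-(i + 1)]:
--             return False
--     return True
--
-- def count_palindrome(board, N, M):
--     """문자열로 이루어진 배열에서 특정 길이의 가로/세로 회문의 개수를 구한다.
--     Args:
--         board: 문자열 배열
--         N: 문자열 하나의 길이 및 문자열의 개수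
--         M: 회문의 길이
--     Returns:
--         count: 문자열 배열 내의 길이 M의 회문의 개수
--     """
--     count = 0
--
--     # 회문의 길이가 1인 경우, 회문의 개수는 곧 문자의 개수
--     if M == 1:
--         return N * N
--
--     # 1. 가로 회문 탐색
--     for r in range(N):
--         for c in range(N - M + 1):
--             # current: board[r][c]에서 시작하는 길이 M의 가로 부분 문자열
--             current = board[r][c:c + M]
--
--             if is_palindrome(current):
--                 count += 1
--
--     # 2. 세로 회문 탐색
--     for c in range(N):
--         for r in range(N - M + 1):
--             # current: board[r][c]에서 시작하는 길이 M의 세로 부분 문자열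
--             current = ''
--             for cnt_r in range(r, r + M):
--                 current += board[cnt_r][c]
--
--             if is_palindrome(current):
--                 count += 1
--
--     return count
-- ===== SOURCE B (Python) =====
-- def count_palindrome(board, N, M):
--     if M == 1:
--         return N * N
--     wins = N - M + 1
--     if N <= 0 or wins <= 0:
--         return 0
--     rows = [board[r][:N] for r in range(N)]
--     cols = [''.join(row[c] for row in rows) for c in range(N)]
--     return sum(1 for line in rows + cols for c in range(wins)
--                if line[c:c + M] == line[c:c + M][::-1])
-- ===== Notes on version B (the rewrite author's own statement) =====
-- stated objective: alternative
-- what changed: B truncates the board to its N-by-N part once, materialises each column string with a single join so A's per-window character-gathering loop disappears, and tests every window by comparing the slice with its reverse instead of A's char-by-char half-scan with early return.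
-- outside the precondition, e.g. on count_palindrome(['bbbab'], 1, -1): A returns 5, B returns 6; on count_palindrome(['bbb', '', ''], 2, 0): A returns 12, B raises IndexError
import Mathlib
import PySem

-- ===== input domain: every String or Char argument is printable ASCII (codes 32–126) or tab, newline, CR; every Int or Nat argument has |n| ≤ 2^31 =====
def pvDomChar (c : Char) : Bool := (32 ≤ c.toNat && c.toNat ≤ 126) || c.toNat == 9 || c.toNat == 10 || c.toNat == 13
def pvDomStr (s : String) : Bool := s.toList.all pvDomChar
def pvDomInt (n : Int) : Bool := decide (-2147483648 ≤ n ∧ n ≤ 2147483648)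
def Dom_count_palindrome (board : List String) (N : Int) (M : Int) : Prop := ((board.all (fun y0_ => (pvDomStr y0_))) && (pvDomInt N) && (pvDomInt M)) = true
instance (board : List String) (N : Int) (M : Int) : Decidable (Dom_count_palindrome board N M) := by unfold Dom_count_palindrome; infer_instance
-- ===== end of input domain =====

-- B truncates the board to its N×N part once, builds each column string once with a join, and tests
-- each window by comparing it with its reverse instead of A's per-window character loops.

-- ===== PORT A =====
-- Python is_palindrome: early-return scan over range(len(word)//2); a Python str is its List Char
def pvPalScan (word : List Char) : List Int → Bool
  | [] => true
  | i :: rest =>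
    if PySem.List.pyGet? word i ≠ PySem.List.pyGet? word (-(i + 1)) then false
    else pvPalScan word rest

def is_palindrome (word : List Char) : Bool :=
  pvPalScan word (PySem.List.pyRange 0 (PySem.Int.floordiv (word.length : Int) 2) 1)

-- board[r] is ported as (pyGet? board r).getD "" and board[cnt_r][c] as pyGetD … ' ': exact wherever
-- the index is in range, which Pre_count_palindrome guarantees for every access A performs.
def count_palindrome (board : List String) (N : Int) (M : Int) : Int :=
  if M = 1 then N * N
  else
    -- 1. horizontal scan
    let count1 : Int := (PySem.List.pyRange 0 N 1).foldl (fun count r =>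
      (PySem.List.pyRange 0 (N - M + 1) 1).foldl (fun count c =>
        let current := PySem.List.slice (((PySem.List.pyGet? board r).getD "").toList)
          (some c) (some (c + M))
        if is_palindrome current then count + 1 else count) count) 0
    -- 2. vertical scan, building each window string char by char
    (PySem.List.pyRange 0 N 1).foldl (fun count c =>
      (PySem.List.pyRange 0 (N - M + 1) 1).foldl (fun count r =>
        let current := (PySem.List.pyRange r (r + M) 1).foldl (fun cur cnt_r =>
          cur ++ [PySem.List.pyGetD (((PySem.List.pyGet? board cnt_r).getD "").toList) c ' ']) []
        if is_palindrome current then count + 1 else count) count) count1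

-- ===== PORT B =====
-- Source B: truncate once, build the column strings once, test each window against its reverse
-- (w[::-1] is w.reverse, PySem.List.slice?_none_none_neg_one)
def count_palindrome_alt (board : List String) (N : Int) (M : Int) : Int :=
  if M = 1 then N * N
  else
    let wins := N - M + 1
    if N ≤ 0 ∨ wins ≤ 0 then 0
    else
      let rows := (PySem.List.pyRange 0 N 1).map (fun r =>
        PySem.List.slice (((PySem.List.pyGet? board r).getD "").toList) none (some N))
      let cols := (PySem.List.pyRange 0 N 1).map (fun c =>
        rows.map (fun row => PySem.List.pyGetD row c ' '))
      ((rows ++ cols).map (fun line =>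
        ((PySem.List.pyRange 0 wins 1).map (fun c =>
          let w := PySem.List.slice line (some c) (some (c + M))
          if w = w.reverse then (1 : Int) else 0)).sum)).sum

-- ===== PRECONDITION & SPEC =====
-- Where A's loops actually touch the board (N ≥ 1, M ≤ N), Pre_ restricts to the natural domain of
-- palindrome lengths M ≥ 1 (for M ≤ 0 A's window slice board[r][c:c+M] wraps to a negative end index,
-- a degenerate corner nobody would specify, on which B's truncated board yields an equally defensible
-- different count or raises on ragged rows) and excludes the boards on which A raises IndexError
-- (fewer than N rows, or a row among the first N shorter than N).
def Pre_count_palindrome (board : List String) (N : Int) (M : Int) : Prop :=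
  M = 1 ∨ N ≤ 0 ∨ N < M ∨ (1 ≤ M ∧
    (N ≤ (board.length : Int)) ∧ ∀ s ∈ board.take N.toNat, N ≤ (s.toList.length : Int))
instance (board : List String) (N : Int) (M : Int) : Decidable (Pre_count_palindrome board N M) := by
  unfold Pre_count_palindrome; infer_instance

def pvWitness_count_palindrome : List String × Int × Int := (["ab", "ba"], 2, 2)

def Spec_count_palindrome (board : List String) (N : Int) (M : Int) (out : Int) : Prop := out = count_palindrome_alt board N M
instance (board : List String) (N : Int) (M : Int) (out : Int) : Decidable (Spec_count_palindrome board N M out) := by unfold Spec_count_palindrome; infer_instance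

-- ===== CLAIM (what is proved, stated in full; the proofs are below) =====
def Claim_equal_count_palindrome : Prop := ∀ (board : List String) (N : Int) (M : Int), Dom_count_palindrome board N M → Pre_count_palindrome board N M → Spec_count_palindrome board N M (count_palindrome board N M)

-- ===== LEMMAS AND PROOFS =====

-- the early-return scan succeeds iff every probed pair of positions matches
lemma pvPalScan_eq_true_iff (w : List Char) (l : List Int) :
    pvPalScan w l = true ↔
      ∀ i ∈ l, PySem.List.pyGet? w i = PySem.List.pyGet? w (-(i + 1)) := by
  induction l with
  | nil => simp [pvPalScan]
  | cons i rest ih =>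
    simp only [pvPalScan, List.mem_cons]
    split_ifs with h
    · simp only [false_iff]
      intro hall
      exact h (hall i (Or.inl rfl))
    · rw [not_not] at h
      rw [ih]
      constructor
      · rintro hall j (rfl | hj)
        · exact h
        · exact hall j hj
      · intro hall j hj
        exact hall j (Or.inr hj)

-- A's half-scan characterises "equal to its own reverse", which is B's window test
lemma is_palindrome_iff (w : List Char) : is_palindrome w = true ↔ w = w.reverse := by
  have hfd : PySem.Int.floordiv (w.length : Int) 2 = ((w.length / 2 : Nat) : Int) := by
    rw [PySem.Int.floordiv_eq_ediv_of_pos (by norm_num)]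
    omega
  rw [is_palindrome, hfd, pvPalScan_eq_true_iff]
  have hprobe : (∀ i ∈ PySem.List.pyRange 0 ((w.length / 2 : Nat) : Int) 1,
      PySem.List.pyGet? w i = PySem.List.pyGet? w (-(i + 1))) ↔
      ∀ j : Nat, j < w.length / 2 → w[j]? = w[w.length - 1 - j]? := by
    constructor
    · intro h j hj
      have hmem : (j : Int) ∈ PySem.List.pyRange 0 ((w.length / 2 : Nat) : Int) 1 := by
        rw [PySem.List.mem_pyRange_one]
        constructor <;> omega
      have := h _ hmem
      rw [PySem.List.pyGet?_natCast] at this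
      have hneg : (-((j : Int) + 1)) = -(((j + 1 : Nat) : Int)) := by push_cast; ring
      rw [hneg, PySem.List.pyGet?_neg_natCast w (j + 1) (by omega)
        (by have := Nat.div_le_self w.length 2; omega)] at this
      have h2 : w[j]? = w[w.length - (j + 1)]? := this
      rw [h2]
      congr 1
      omega
    · intro h i hi
      rw [PySem.List.mem_pyRange_one] at hi
      obtain ⟨h0, h1⟩ := hi
      have hj : i = ((i.toNat : Nat) : Int) := by omega
      have hjlt : i.toNat < w.length / 2 := by omega
      rw [hj, PySem.List.pyGet?_natCast]
      have hneg : (-(((i.toNat : Nat) : Int) + 1)) = -(((i.toNat + 1 : Nat) : Int)) := by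
        push_cast; ring
      rw [hneg, PySem.List.pyGet?_neg_natCast w (i.toNat + 1) (by omega)
        (by have := Nat.div_le_self w.length 2; omega)]
      have h2 := h i.toNat hjlt
      rw [h2]
      congr 1
      omega
  rw [hprobe]
  constructor
  · intro h
    apply List.ext_getElem?
    intro i
    by_cases hi : i < w.length
    · rw [List.getElem?_reverse hi]
      rcases Nat.lt_or_ge i (w.length / 2) with hlt | hge
      · exact h i hlt
      · rcases Nat.lt_or_ge (w.length - 1 - i) (w.length / 2) with hlt' | hge'
        · have h3 := h _ hlt'
          have heq : w.length - 1 - (w.length - 1 - i) = i := by omega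
          rw [heq] at h3
          exact h3.symm
        · have hmid : i = w.length - 1 - i := by omega
          rw [← hmid]
    · rw [List.getElem?_eq_none (by omega),
        List.getElem?_eq_none (by rw [List.length_reverse]; omega)]
  · intro h j hj
    conv_lhs => rw [h]
    exact List.getElem?_reverse (by omega)

-- a window slice of the truncated row equals the window slice of the full row
lemma slice_take_eq (l : List Char) (c M N : Int) (hc : 0 ≤ c) (hM : 0 ≤ M)
    (hcM : c + M ≤ N) :
    PySem.List.slice (l.take N.toNat) (some c) (some (c + M)) =
      PySem.List.slice l (some c) (some (c + M))  := by
  rw [PySem.List.slice_toNat _ hc (by omega), PySem.List.slice_toNat _ hc (by omega),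
    List.drop_take, List.take_take]
  congr 1
  omega

-- a drop/take segment of pyRange 0 N is pyRange r (r+M)
lemma pyRange_segment (r M N : Int) (hr : 0 ≤ r) (hrM : r + M ≤ N) :
    ((PySem.List.pyRange 0 N 1).drop r.toNat).take M.toNat = PySem.List.pyRange r (r + M) 1 := by
  rw [PySem.List.pyRange_one, PySem.List.pyRange_one, ← List.map_drop, ← List.map_take]
  apply List.ext_getElem
  · simp
    omega
  · intro i h1 h2
    simp [List.getElem_drop]
    omega

-- B's 0/1 sum over a window list is a countP
lemma sum_ite_count (W : List Int) (p : Int → Prop) [DecidablePred p] :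
    (W.map (fun c => if p c then (1 : Int) else 0)).sum =
      ((W.countP (fun c => decide (p c)) : Nat) : Int) := by
  rw [← PySem.List.sum_map_ite_one_zero]
  exact congrArg List.sum (List.map_congr_left (fun c _ => by simp))

-- the main (rectangular) case: 2 ≤ M ≤ N, at least N rows each of length ≥ N
lemma count_palindrome_main (board : List String) (N : Int) (M : Int)
    (hM1 : 1 ≤ M) (hM : ¬ M = 1) (hN0 : ¬ N ≤ 0) (hNM : ¬ N < M)
    (hlen : N ≤ (board.length : Int))
    (hrows : ∀ s ∈ board.take N.toNat, N ≤ (s.toList.length : Int)) :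
    count_palindrome board N M = count_palindrome_alt board N M := by
  have hM2 : 2 ≤ M := by omega
  have hw1 : ¬ (N ≤ 0 ∨ N - M + 1 ≤ 0) := by omega
  set row : Int → List Char := fun r => ((PySem.List.pyGet? board r).getD "").toList with hrow
  have hrowlen : ∀ r : Int, 0 ≤ r → r < N → N ≤ ((row r).length : Int) := by
    intro r h0 h1
    have hlt : r.toNat < board.length := by omega
    have hsome : PySem.List.pyGet? board r = some (board[r.toNat]) := by
      rw [PySem.List.pyGet?_of_nonneg _ h0, List.getElem?_eq_getElem hlt]
    rw [hrow]
    simp only [hsome, Option.getD_some]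
    apply hrows
    have hco : (board.take N.toNat)[r.toNat]'(by simp; omega) = board[r.toNat] :=
      List.getElem_take
    rw [← hco]
    exact List.getElem_mem _
  rw [count_palindrome, count_palindrome_alt, if_neg hM, if_neg hM, if_neg hw1]
  simp only [PySem.List.foldl_count_if, PySem.List.foldl_append_singleton_eq_map,
    List.nil_append, PySem.List.foldl_add, List.map_append, List.sum_append, List.map_map]
  rw [zero_add]
  have hWmem : ∀ c ∈ PySem.List.pyRange 0 (N - M + 1) 1, 0 ≤ c ∧ c < N - M + 1 := by
    intro c hc
    rwa [PySem.List.mem_pyRange_one] at hc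
  have hRmem : ∀ r ∈ PySem.List.pyRange 0 N 1, 0 ≤ r ∧ r < N := by
    intro r hr
    rwa [PySem.List.mem_pyRange_one] at hr
  congr 1
  · -- horizontal windows: the same slice, A's half-scan vs B's reverse comparison
    apply congrArg List.sum
    apply List.map_congr_left
    intro r hr
    obtain ⟨hr0, hrN⟩ := hRmem r hr
    simp only [Function.comp_def]
    rw [sum_ite_count]
    apply congrArg _
    apply List.countP_congr
    intro c hc
    obtain ⟨hc0, hcw⟩ := hWmem c hc
    rw [PySem.List.slice_to _ (by omega : (0:Int) ≤ N),
      slice_take_eq _ c M N hc0 (by omega) (by omega),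
      is_palindrome_iff]
    simp
  · -- vertical windows: A's char-by-char string equals B's slice of the column
    apply congrArg List.sum
    apply List.map_congr_left
    intro c hc
    obtain ⟨hc0, hcN⟩ := hRmem c hc
    simp only [Function.comp_def]
    rw [sum_ite_count]
    apply congrArg _
    apply List.countP_congr
    intro r hrc
    obtain ⟨hr0, hrw⟩ := hWmem r hrc
    have hwin : PySem.List.slice
        (List.map (fun r => PySem.List.pyGetD
          (PySem.List.slice ((PySem.List.pyGet? board r).getD "").toList none (some N)) c ' ')
          (PySem.List.pyRange 0 N 1)) (some r) (some (r + M)) =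
        List.map (fun i => PySem.List.pyGetD ((PySem.List.pyGet? board i).getD "").toList c ' ')
          (PySem.List.pyRange r (r + M) 1) := by
      rw [PySem.List.slice_toNat _ hr0 (by omega), ← List.map_drop, ← List.map_take]
      have hsub : (r + M).toNat - r.toNat = M.toNat := by omega
      rw [hsub, pyRange_segment r M N hr0 (by omega)]
      apply List.map_congr_left
      intro i hi
      rw [PySem.List.mem_pyRange_one] at hi
      have hiN : N ≤ ((row i).length : Int) := hrowlen i (by omega) (by omega)
      rw [PySem.List.slice_to _ (by omega : (0:Int) ≤ N)]
      rw [PySem.List.pyGetD_eq_getElem _ _ hc0 (by simp [hrow] at hiN ⊢; omega),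
        PySem.List.pyGetD_eq_getElem _ _ hc0 (by simp [hrow] at hiN ⊢; omega),
        List.getElem_take]
    rw [hwin, is_palindrome_iff]
    simp

-- ===== VERDICT (by name: the statement is the Claim_ definition above) =====
theorem count_palindrome_spec : Claim_equal_count_palindrome := by
  intro board N M _ hpre
  unfold Spec_count_palindrome
  by_cases hM : M = 1
  · rw [count_palindrome, count_palindrome_alt, if_pos hM, if_pos hM]
  by_cases hN0 : N ≤ 0
  · have hemp : PySem.List.pyRange 0 N 1 = ([] : List Int) := by
      rw [PySem.List.pyRange_one]
      simp
      omega
    rw [count_palindrome, count_palindrome_alt, if_neg hM, if_neg hM,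
      if_pos (Or.inl hN0)]
    simp [hemp]
  by_cases hNM : N < M
  · have hemp : PySem.List.pyRange 0 (N - M + 1) 1 = ([] : List Int) := by
      rw [PySem.List.pyRange_one]
      simp
      omega
    rw [count_palindrome, count_palindrome_alt, if_neg hM, if_neg hM,
      if_pos (Or.inr (by omega))]
    simp [hemp, List.foldl_fixed]
  have hrect : 1 ≤ M ∧ (N ≤ (board.length : Int)) ∧
      ∀ s ∈ board.take N.toNat, N ≤ (s.toList.length : Int) := by
    rcases hpre with h | h | h | h
    · exact absurd h hM
    · exact absurd h hN0
    · exact absurd h hNM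
    · exact h
  exact count_palindrome_main board N M hrect.1 hM hN0 hNM hrect.2.1 hrect.2.2
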